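-- pv_equiv track=rewrite | github.com/Young-Ho-Boss/parallel | t.py | psi_Matrix
-- ===== SOURCE A (Python) =====
-- def psi_Matrix(d: int, k: int) -> list:
--     size = d ** 2
--     U = [[0 for _ in range(size)] for _ in range(size)]
--     for i in range(d):
--         for j in range(d):
--             row = d * i + j
--             col = d * ((i + k) % d) + j
--             U[row][col] = 1
--     return U
-- ===== SOURCE B (Python) =====
-- def psi_Matrix(d: int, k: int) -> list:
--     # Stage 1: materialize the d x d cyclic block-shift matrix S.
--     S = [[0] * d for _ in range(d)]
--     for i in range(d):
--         S[i][(i + k) % d] = 1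
--     # Stage 2: Kronecker-expand S with the d x d identity: scan S and
--     # replace each unit entry by an identity block (fill its diagonal).
--     size = d * d
--     U = [[0] * size for _ in range(size)]
--     for i in range(d):
--         for j in range(d):
--             if S[i][j]:
--                 for a in range(d):
--                     U[d * i + a][d * j + a] = 1
--     return U
-- ===== Notes on version B (the rewrite author's own statement) =====
-- stated objective: faster
-- what changed: B computes the matrix as a Kronecker expansion: it first materializes the d x d cyclic block-shift matrix S, then scans S and replaces each unit entry by a d x d identity block (filling the block diagonal), instead of computing each 1's row/col by index arithmetic with a modulus in one nested loop; zero rows are allocated by list repetition rather than per-cell comprehensions.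
import Mathlib
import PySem

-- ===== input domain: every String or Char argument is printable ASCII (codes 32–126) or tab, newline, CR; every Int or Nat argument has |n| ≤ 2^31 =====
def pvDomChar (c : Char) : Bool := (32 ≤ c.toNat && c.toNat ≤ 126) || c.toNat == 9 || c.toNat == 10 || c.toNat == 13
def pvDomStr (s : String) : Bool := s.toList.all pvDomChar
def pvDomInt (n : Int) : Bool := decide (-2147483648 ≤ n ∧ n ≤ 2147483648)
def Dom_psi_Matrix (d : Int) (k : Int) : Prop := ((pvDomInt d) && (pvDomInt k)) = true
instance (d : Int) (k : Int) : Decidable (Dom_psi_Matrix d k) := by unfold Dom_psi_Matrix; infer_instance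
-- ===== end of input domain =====

-- B builds the d x d cyclic block-shift matrix explicitly and then Kronecker-expands its unit
-- entries into identity blocks, instead of placing each 1 by index arithmetic with a modulus;
-- B is intended to be faster by a constant factor (cheaper zero-row allocation).

-- ===== PORT A =====
def psi_Matrix (d : Int) (k : Int) : List (List Int) :=
  let size := d ^ 2
  let U := (PySem.List.pyRange 0 size 1).map (fun _ => (PySem.List.pyRange 0 size 1).map (fun _ => (0 : Int)))
  (PySem.List.pyRange 0 d 1).foldl (fun U i =>
    (PySem.List.pyRange 0 d 1).foldl (fun U j =>
      let row := d * i + j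
      let col := d * (PySem.Int.mod (i + k) d) + j
      -- U[row][col] = 1 ; row and col are in range whenever this loop body runs,
      -- so the total pyGetD/pySetD forms are exact here
      PySem.List.pySetD U row (PySem.List.pySetD (PySem.List.pyGetD U row []) col 1)) U) U

-- ===== PORT B =====
def psi_Matrix_alt (d : Int) (k : Int) : List (List Int) :=
  -- Stage 1: the d x d cyclic block-shift matrix S ([0]*d ports as List.replicate)
  let S0 := (PySem.List.pyRange 0 d 1).map (fun _ => List.replicate d.toNat (0 : Int))
  let S := (PySem.List.pyRange 0 d 1).foldl (fun S i =>
      -- S[i][(i+k) % d] = 1 ; indices in range whenever the body runs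
      PySem.List.pySetD S i (PySem.List.pySetD (PySem.List.pyGetD S i []) (PySem.Int.mod (i + k) d) 1)) S0
  -- Stage 2: Kronecker-expand each unit entry of S into a d x d identity block
  let size := d * d
  let U0 := (PySem.List.pyRange 0 size 1).map (fun _ => List.replicate size.toNat (0 : Int))
  (PySem.List.pyRange 0 d 1).foldl (fun U i =>
    (PySem.List.pyRange 0 d 1).foldl (fun U j =>
      -- 'if S[i][j]:' — Python truthiness of an int is ≠ 0
      if PySem.List.pyGetD (PySem.List.pyGetD S i []) j 0 ≠ 0 then
        (PySem.List.pyRange 0 d 1).foldl (fun U a =>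
          PySem.List.pySetD U (d * i + a)
            (PySem.List.pySetD (PySem.List.pyGetD U (d * i + a) []) (d * j + a) 1)) U
      else U) U) U0

-- ===== PRECONDITION & SPEC =====
def Spec_psi_Matrix (d : Int) (k : Int) (out : List (List Int)) : Prop := out = psi_Matrix_alt d k
instance (d : Int) (k : Int) (out : List (List Int)) : Decidable (Spec_psi_Matrix d k out) := by unfold Spec_psi_Matrix; infer_instance

-- ===== CLAIM (what is proved, stated in full; the proofs are below) =====
def Claim_equal_psi_Matrix : Prop := ∀ (d : Int) (k : Int), Dom_psi_Matrix d k → Spec_psi_Matrix d k (psi_Matrix d k)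

-- ===== LEMMAS AND PROOFS =====

-- the (row, col) positions of the 1s, in the order A traverses them
def pvUpd (d kk : Int) : List (Int × Int) :=
  (PySem.List.pyRange 0 d 1).flatMap (fun i =>
    (PySem.List.pyRange 0 d 1).map (fun j => (d * i + j, d * (PySem.Int.mod (i + kk) d) + j)))

-- the 'put a 1 at (row, col)' loop body, as a single fold over a position list
def pvApply (U : List (List Int)) (ps : List (Int × Int)) : List (List Int) :=
  ps.foldl (fun U p => PySem.List.pySetD U p.1 (PySem.List.pySetD (PySem.List.pyGetD U p.1 []) p.2 1)) U

def pvZeros (s : Int) : List (List Int) :=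
  (PySem.List.pyRange 0 s 1).map (fun _ => (PySem.List.pyRange 0 s 1).map (fun _ => (0 : Int)))

theorem pvRepl (s : Int) : List.replicate s.toNat (0 : Int) = (PySem.List.pyRange 0 s 1).map (fun _ => (0 : Int)) := by
  apply List.ext_getElem
  · simp [PySem.List.length_pyRange_one]
  · intro j h1 h2; simp

theorem pvA_eq (d kk : Int) : psi_Matrix d kk = pvApply (pvZeros (d ^ 2)) (pvUpd d kk) := by
  simp [psi_Matrix, pvApply, pvUpd, pvZeros, List.foldl_flatMap, List.foldl_map]

-- Stage 1 of B: a fold that sets row i (from its own old value) once, for i = 0..m-1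
theorem pvS_spec (kk dd : Int) (L : List (List Int)) : ∀ (m : Nat), m ≤ L.length → ∀ r : Nat,
    ((PySem.List.pyRange 0 (m : Int) 1).foldl (fun S i =>
        PySem.List.pySetD S i (PySem.List.pySetD (PySem.List.pyGetD S i []) (PySem.Int.mod (i + kk) dd) 1)) L)[r]? =
    if r < m then
      some (PySem.List.pySetD (PySem.List.pyGetD L (r : Int) []) (PySem.Int.mod ((r : Int) + kk) dd) 1)
    else L[r]? := by
  intro m
  induction m with
  | zero =>
    intro _ r
    simp [PySem.List.pyRange_one_eq_nil]
  | succ m ih =>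
    intro hm r
    have hm' : m ≤ L.length := by omega
    push_cast
    rw [PySem.List.pyRange_one_succ_right (by positivity), List.foldl_append]
    simp only [List.foldl_cons, List.foldl_nil]
    have hrow : ((PySem.List.pyRange 0 (m : Int) 1).foldl (fun S i =>
        PySem.List.pySetD S i (PySem.List.pySetD (PySem.List.pyGetD S i []) (PySem.Int.mod (i + kk) dd) 1)) L)[m]?
        = L[m]? := by
      rw [ih hm' m]; simp
    have hmlt : m < L.length := by omega
    obtain ⟨row, hrowL⟩ : ∃ row, L[m]? = some row := ⟨L[m], List.getElem?_eq_getElem hmlt⟩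
    have hget : PySem.List.pyGetD ((PySem.List.pyRange 0 (m : Int) 1).foldl (fun S i =>
        PySem.List.pySetD S i (PySem.List.pySetD (PySem.List.pyGetD S i []) (PySem.Int.mod (i + kk) dd) 1)) L)
        (m : Int) [] = PySem.List.pyGetD L (m : Int) [] := by
      rw [PySem.List.pyGetD_of_nonneg _ _ (by positivity), PySem.List.pyGetD_of_nonneg _ _ (by positivity)]
      simp only [Int.toNat_natCast]
      rw [List.getD_eq_getElem?_getD, List.getD_eq_getElem?_getD, hrow]
    rw [hget, PySem.List.pySetD_of_nonneg _ _ (by positivity)]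
    simp only [Int.toNat_natCast]
    have hmlt' : m < ((PySem.List.pyRange 0 (m : Int) 1).foldl (fun S i =>
        PySem.List.pySetD S i (PySem.List.pySetD (PySem.List.pyGetD S i []) (PySem.Int.mod (i + kk) dd) 1)) L).length := by
      have := hrow; rw [hrowL] at this
      exact (List.getElem?_eq_some_iff.mp this).1
    rcases Nat.lt_trichotomy r m with hr | hr | hr
    · rw [List.getElem?_set_ne (by omega), ih hm' r]
      simp only [hr, if_pos, if_pos (by omega : r < m + 1)]
    · subst hr
      rw [List.getElem?_set_self hmlt']
      simp
    · rw [List.getElem?_set_ne (by omega), ih hm' r]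
      have h1 : ¬ r < m := by omega
      have h2 : ¬ r < m + 1 := by omega
      simp [h1, h2]

-- an 'if j = c' loop body over a duplicate-free list fires exactly once
theorem pvFold_if_none {α : Type} (F : α → α) (c : Int) :
    ∀ (l : List Int), c ∉ l → ∀ (U : α), l.foldl (fun U j => if j = c then F U else U) U = U := by
  intro l
  induction l with
  | nil => intro _ U; rfl
  | cons x tl ih =>
    intro hc U
    simp only [List.mem_cons, not_or] at hc
    have hx : ¬ x = c := fun h => hc.1 h.symm
    simp only [List.foldl_cons, if_neg hx]
    exact ih hc.2 U

theorem pvFold_if_single {α : Type} (F : α → α) (c : Int) :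
    ∀ (l : List Int), l.Nodup → c ∈ l → ∀ (U : α), l.foldl (fun U j => if j = c then F U else U) U = F U := by
  intro l
  induction l with
  | nil => intro _ h; cases h
  | cons x tl ih =>
    intro hnd hc U
    rw [List.nodup_cons] at hnd
    by_cases hx : x = c
    · subst hx
      simp only [List.foldl_cons, if_pos]
      exact pvFold_if_none F x tl hnd.1 (F U)
    · simp only [List.foldl_cons, if_neg hx]
      refine ih hnd.2 ?_ U
      rcases List.mem_cons.mp hc with h | h
      · exact absurd h.symm hx
      · exact h

theorem pvB_eq (d kk : Int) : psi_Matrix_alt d kk = pvApply (pvZeros (d ^ 2)) (pvUpd d kk) := by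
  have hsq : d ^ 2 = d * d := sq d
  have hz : (PySem.List.pyRange 0 (d * d) 1).map (fun _ => List.replicate (d * d).toNat (0 : Int))
      = pvZeros (d ^ 2) := by
    rw [pvZeros, hsq, ← pvRepl]
  rcases le_or_gt d 0 with hd | hd
  · simp [psi_Matrix_alt, pvApply, pvUpd, PySem.List.pyRange_one_eq_nil hd, hz]
  · obtain ⟨n, rfl⟩ : ∃ n : Nat, d = (n : Int) := ⟨d.toNat, by omega⟩
    simp only [psi_Matrix_alt, hz]
    rw [pvApply, pvUpd, List.foldl_flatMap]
    apply PySem.List.foldl_congr_mem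
    intro U i hi
    rw [PySem.List.mem_pyRange_one] at hi
    set c := PySem.Int.mod (i + kk) (n : Int) with hc
    have hc0 : 0 ≤ c := PySem.Int.mod_nonneg (i + kk) hd
    have hc1 : c < (n : Int) := PySem.Int.mod_lt (i + kk) hd
    -- the base row table and its lookups
    set L : List (List Int) := (PySem.List.pyRange 0 (n : Int) 1).map (fun _ => List.replicate (n : Int).toNat (0 : Int)) with hL
    have hLlen : L.length = n := by
      rw [hL]; simp [PySem.List.length_pyRange_one]
    have hLget : ∀ r : Nat, r < n → L[r]? = some (List.replicate (n : Int).toNat (0 : Int)) := by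
      intro r hr
      rw [hL]
      rw [List.getElem?_map, PySem.List.getElem?_pyRange_one]
      simp [hr]
    -- the built shift matrix, evaluated at row i
    have hSrow : PySem.List.pyGetD
        ((PySem.List.pyRange 0 (n : Int) 1).foldl (fun S i =>
            PySem.List.pySetD S i (PySem.List.pySetD (PySem.List.pyGetD S i []) (PySem.Int.mod (i + kk) (n : Int)) 1)) L) i []
        = PySem.List.pySetD (List.replicate (n : Int).toNat (0 : Int)) c 1 := by
      rw [PySem.List.pyGetD_of_nonneg _ _ hi.1, List.getD_eq_getElem?_getD]
      rw [pvS_spec kk (n : Int) L n (by omega) i.toNat]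
      have hin : i.toNat < n := by omega
      have hcast : ((i.toNat : Int)) = i := by omega
      rw [if_pos hin, hcast, PySem.List.pyGetD_of_nonneg _ _ hi.1, List.getD_eq_getElem?_getD,
          hLget i.toNat hin]
      simp [hc]
    -- row i of S is one-hot at column c
    have hcond : ∀ j : Int, 0 ≤ j → j < (n : Int) →
        ((PySem.List.pyGetD (PySem.List.pySetD (List.replicate (n : Int).toNat (0 : Int)) c 1) j 0 ≠ 0) ↔ j = c) := by
      intro j hj0 hj1
      rw [PySem.List.pySetD_of_nonneg _ _ hc0, PySem.List.pyGetD_of_nonneg _ _ hj0,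
          List.getD_eq_getElem?_getD]
      by_cases hjc : j = c
      · subst hjc
        rw [List.getElem?_set_self (by simp; omega)]
        simp
      · rw [List.getElem?_set_ne (by omega)]
        have hjd : j.toNat < (n : Int).toNat := by omega
        simp only [List.getElem?_replicate, hjd, if_pos, Option.getD_some]
        simp [hjc]
    rw [List.foldl_map]
    -- collapse the j-scan of row i of S to the single firing column c
    have hstep : (PySem.List.pyRange 0 (n : Int) 1).foldl (fun U j =>
        if PySem.List.pyGetD (PySem.List.pyGetD
            ((PySem.List.pyRange 0 (n : Int) 1).foldl (fun S i =>
                PySem.List.pySetD S i (PySem.List.pySetD (PySem.List.pyGetD S i []) (PySem.Int.mod (i + kk) (n : Int)) 1)) L) i []) j 0 ≠ 0 then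
          (PySem.List.pyRange 0 (n : Int) 1).foldl (fun U a =>
            PySem.List.pySetD U ((n : Int) * i + a)
              (PySem.List.pySetD (PySem.List.pyGetD U ((n : Int) * i + a) []) ((n : Int) * j + a) 1)) U
        else U) U
      = (PySem.List.pyRange 0 (n : Int) 1).foldl (fun U j =>
        if j = c then
          (PySem.List.pyRange 0 (n : Int) 1).foldl (fun U a =>
            PySem.List.pySetD U ((n : Int) * i + a)
              (PySem.List.pySetD (PySem.List.pyGetD U ((n : Int) * i + a) []) ((n : Int) * c + a) 1)) U
        else U) U := by
      apply PySem.List.foldl_congr_mem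
      intro V j hj
      rw [PySem.List.mem_pyRange_one] at hj
      rw [hSrow]
      by_cases hjc : j = c
      · rw [if_pos ((hcond j hj.1 hj.2).mpr hjc), if_pos hjc, hjc]
      · rw [if_neg (fun h => hjc ((hcond j hj.1 hj.2).mp h)), if_neg hjc]
    rw [hstep, pvFold_if_single _ c _ (PySem.List.nodup_pyRange_one 0 (n : Int))
        (by rw [PySem.List.mem_pyRange_one]; exact ⟨hc0, hc1⟩)]

-- ===== VERDICT (by name: the statement is the Claim_ definition above) =====
theorem psi_Matrix_spec : Claim_equal_psi_Matrix := by
  intro d kk _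
  unfold Spec_psi_Matrix
  rw [pvA_eq, pvB_eq]
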